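-- pv_equiv track=rewrite | github.com/elasticspoon/PProjects | jamesfreethrows/gamelogs.py | grossEval
-- ===== SOURCE A (Python) =====
-- def grossEval(matrix):
--
--     make1 = 0
--     make2 = 0
--     make3 = 0
--     miss1 = 0
--     miss2 = 0
--     miss3 = 0
--     misst = 0
--     maket = 0
--     makeflg1 = 0
--     makeflg2 = 0
--     missflg1 = 0
--     missflg2 = 0
--     makecp = 0
--     misscp = 0
--
--
--     for play in matrix:
--         if "MISS" in play:
--             if "Free Throw 1 of 3" in play or "Free Throw 1 of 2" in play or "Free Throw 1 of 1" in play: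
--                 miss1 += 1
--                 continue
--             if "Free Throw 2 of 3" in play or "Free Throw 2 of 2" in play:
--                 miss2 += 1
--                 continue
--             if "Free Throw 3 of 3" in play:
--                 miss3 += 1
--                 continue
--             if "Technical" in play:
--                 misst += 1
--                 continue
--             if "Flagrant 1 of 1" in play or "Flagrant 1 of 2" in play:
--                 missflg1 += 1
--                 continue
--             if "Flagrant 2 of 2" in play:
--                 missflg2 += 1
--                 continue
--             if "Clear Path" in play:
--                 misscp += 1
--                 continue
--         else:
--             if "Free Throw 1 of 3" in play or "Free Throw 1 of 2" in play or "Free Throw 1 of 1" in play: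
--                 make1 += 1
--                 continue
--             if "Free Throw 2 of 3" in play or "Free Throw 2 of 2" in play:
--                 make2 += 1
--                 continue
--             if "Free Throw 3 of 3" in play:
--                 make3 += 1
--                 continue
--             if "Technical" in play:
--                 maket += 1
--                 continue
--             if "Flagrant 1 of 1" in play or "Flagrant 1 of 2" in play:
--                 makeflg1 += 1
--                 continue
--             if "Flagrant 2 of 2" in play:
--                 makeflg2 += 1
--                 continue
--             if "Clear Path" in play:
--                 makecp += 1
--                 continue
--
--     return [make1, miss1, make2, miss2, make3, miss3, maket, misst, makeflg1, missflg1, makeflg2, missflg2, makecp, misscp]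
-- ===== SOURCE B (Python) =====
-- GROUPS = [
--     ["Free Throw 1 of 3", "Free Throw 1 of 2", "Free Throw 1 of 1"],
--     ["Free Throw 2 of 3", "Free Throw 2 of 2"],
--     ["Free Throw 3 of 3"],
--     ["Technical"],
--     ["Flagrant 1 of 1", "Flagrant 1 of 2"],
--     ["Flagrant 2 of 2"],
--     ["Clear Path"],
-- ]
--
--
-- def _hits(play, subs):
--     return any(s in play for s in subs)
--
--
-- def grossEval(matrix):
--     # Staged passes: for each category (in priority order), filter the plays
--     # that belong to it (trigger present, no higher-priority trigger), count
--     # the misses among them, and derive the makes as the remainder.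
--     result = []
--     seen = []
--     for subs in GROUPS:
--         matched = [p for p in matrix if _hits(p, subs) and not _hits(p, seen)]
--         misses = sum(1 for p in matched if "MISS" in p)
--         result += [len(matched) - misses, misses]
--         seen = seen + subs
--     return result
-- ===== Notes on version B (the rewrite author's own statement) =====
-- stated objective: alternative
-- what changed: Replaced A's single pass with 14 running counters and two duplicated 7-branch if/continue chains by staged passes: for each category in priority order, filter the plays that belong to it (trigger present, no higher-priority trigger), count the misses among them, and derive the makes by subtraction.
import Mathlib
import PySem

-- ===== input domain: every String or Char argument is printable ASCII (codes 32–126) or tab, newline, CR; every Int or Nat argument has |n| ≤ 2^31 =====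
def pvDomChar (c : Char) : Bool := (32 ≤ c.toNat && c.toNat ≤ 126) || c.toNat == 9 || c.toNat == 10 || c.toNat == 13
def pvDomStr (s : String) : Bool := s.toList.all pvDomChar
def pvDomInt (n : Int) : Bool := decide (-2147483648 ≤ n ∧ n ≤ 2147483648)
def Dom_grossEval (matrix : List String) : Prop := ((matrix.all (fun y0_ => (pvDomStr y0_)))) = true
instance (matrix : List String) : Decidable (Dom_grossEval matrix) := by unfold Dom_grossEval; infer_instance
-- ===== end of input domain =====

-- B replaces A's single pass with 14 running counters and two duplicated 7-branch
-- if/continue chains by staged passes: per category, filter the plays belonging to it,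
-- count the misses, derive makes by subtraction (objective: alternative; same O(n), more passes).

-- ===== PORT A =====
-- the 14 accumulators of A, in initialisation order
abbrev GEState := Int × Int × Int × Int × Int × Int × Int × Int × Int × Int × Int × Int × Int × Int

def grossEvalStep (s : GEState) (play : String) : GEState :=
  match s with
  | (make1, make2, make3, miss1, miss2, miss3, misst, maket,
     makeflg1, makeflg2, missflg1, missflg2, makecp, misscp) =>
    if PySem.Str.isIn "MISS" play then
      if PySem.Str.isIn "Free Throw 1 of 3" play || (PySem.Str.isIn "Free Throw 1 of 2" play || PySem.Str.isIn "Free Throw 1 of 1" play) then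
        (make1, make2, make3, miss1 + 1, miss2, miss3, misst, maket, makeflg1, makeflg2, missflg1, missflg2, makecp, misscp)
      else if PySem.Str.isIn "Free Throw 2 of 3" play || PySem.Str.isIn "Free Throw 2 of 2" play then
        (make1, make2, make3, miss1, miss2 + 1, miss3, misst, maket, makeflg1, makeflg2, missflg1, missflg2, makecp, misscp)
      else if PySem.Str.isIn "Free Throw 3 of 3" play then
        (make1, make2, make3, miss1, miss2, miss3 + 1, misst, maket, makeflg1, makeflg2, missflg1, missflg2, makecp, misscp)
      else if PySem.Str.isIn "Technical" play then
        (make1, make2, make3, miss1, miss2, miss3, misst + 1, maket, makeflg1, makeflg2, missflg1, missflg2, makecp, misscp)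
      else if PySem.Str.isIn "Flagrant 1 of 1" play || PySem.Str.isIn "Flagrant 1 of 2" play then
        (make1, make2, make3, miss1, miss2, miss3, misst, maket, makeflg1, makeflg2, missflg1 + 1, missflg2, makecp, misscp)
      else if PySem.Str.isIn "Flagrant 2 of 2" play then
        (make1, make2, make3, miss1, miss2, miss3, misst, maket, makeflg1, makeflg2, missflg1, missflg2 + 1, makecp, misscp)
      else if PySem.Str.isIn "Clear Path" play then
        (make1, make2, make3, miss1, miss2, miss3, misst, maket, makeflg1, makeflg2, missflg1, missflg2, makecp, misscp + 1)
      else s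
    else
      if PySem.Str.isIn "Free Throw 1 of 3" play || (PySem.Str.isIn "Free Throw 1 of 2" play || PySem.Str.isIn "Free Throw 1 of 1" play) then
        (make1 + 1, make2, make3, miss1, miss2, miss3, misst, maket, makeflg1, makeflg2, missflg1, missflg2, makecp, misscp)
      else if PySem.Str.isIn "Free Throw 2 of 3" play || PySem.Str.isIn "Free Throw 2 of 2" play then
        (make1, make2 + 1, make3, miss1, miss2, miss3, misst, maket, makeflg1, makeflg2, missflg1, missflg2, makecp, misscp)
      else if PySem.Str.isIn "Free Throw 3 of 3" play then
        (make1, make2, make3 + 1, miss1, miss2, miss3, misst, maket, makeflg1, makeflg2, missflg1, missflg2, makecp, misscp)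
      else if PySem.Str.isIn "Technical" play then
        (make1, make2, make3, miss1, miss2, miss3, misst, maket + 1, makeflg1, makeflg2, missflg1, missflg2, makecp, misscp)
      else if PySem.Str.isIn "Flagrant 1 of 1" play || PySem.Str.isIn "Flagrant 1 of 2" play then
        (make1, make2, make3, miss1, miss2, miss3, misst, maket, makeflg1 + 1, makeflg2, missflg1, missflg2, makecp, misscp)
      else if PySem.Str.isIn "Flagrant 2 of 2" play then
        (make1, make2, make3, miss1, miss2, miss3, misst, maket, makeflg1, makeflg2 + 1, missflg1, missflg2, makecp, misscp)
      else if PySem.Str.isIn "Clear Path" play then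
        (make1, make2, make3, miss1, miss2, miss3, misst, maket, makeflg1, makeflg2, missflg1, missflg2, makecp + 1, misscp)
      else s

def grossEval (matrix : List String) : List Int :=
  match matrix.foldl grossEvalStep
      ((0, 0, 0, 0, 0, 0, 0, 0, 0, 0, 0, 0, 0, 0) : GEState) with
  | (make1, make2, make3, miss1, miss2, miss3, misst, maket,
     makeflg1, makeflg2, missflg1, missflg2, makecp, misscp) =>
    [make1, miss1, make2, miss2, make3, miss3, maket, misst,
     makeflg1, missflg1, makeflg2, missflg2, makecp, misscp]

-- ===== PORT B =====
-- the trigger-substring groups, in priority order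
def geGroups : List (List String) :=
  [["Free Throw 1 of 3", "Free Throw 1 of 2", "Free Throw 1 of 1"],
   ["Free Throw 2 of 3", "Free Throw 2 of 2"],
   ["Free Throw 3 of 3"],
   ["Technical"],
   ["Flagrant 1 of 1", "Flagrant 1 of 2"],
   ["Flagrant 2 of 2"],
   ["Clear Path"]]

def geHits (play : String) (subs : List String) : Bool :=
  subs.any (fun s => PySem.Str.isIn s play)

-- staged passes: per group filter the matching plays, count misses, makes by subtraction
def grossEval_alt (matrix : List String) : List Int :=
  (geGroups.foldl
    (fun (acc : List Int × List String) subs =>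
      let matched := matrix.filter (fun p => geHits p subs && !geHits p acc.2)
      let misses : Int := (matched.countP (fun p => PySem.Str.isIn "MISS" p) : Nat)
      (acc.1 ++ [(matched.length : Int) - misses, misses], acc.2 ++ subs))
    ([], [])).1

-- ===== PRECONDITION & SPEC =====
def Spec_grossEval (matrix : List String) (out : List Int) : Prop := out = grossEval_alt matrix
instance (matrix : List String) (out : List Int) : Decidable (Spec_grossEval matrix out) := by unfold Spec_grossEval; infer_instance

-- ===== CLAIM (what is proved, stated in full; the proofs are below) =====
def Claim_equal_grossEval : Prop := ∀ (matrix : List String), Dom_grossEval matrix → Spec_grossEval matrix (grossEval matrix)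

-- ===== LEMMAS AND PROOFS =====
-- count of a predicate, as an Int (what one staged pass of B computes)
def cnt (q : String → Bool) (l : List String) : Int := (l.countP q : Nat)

-- the seven category predicates, exactly B's filter conditions (group hit, no earlier-group hit)
def cat1 (p : String) : Bool := geHits p ["Free Throw 1 of 3", "Free Throw 1 of 2", "Free Throw 1 of 1"] && !geHits p []
def cat2 (p : String) : Bool := geHits p ["Free Throw 2 of 3", "Free Throw 2 of 2"] && !geHits p ["Free Throw 1 of 3", "Free Throw 1 of 2", "Free Throw 1 of 1"]
def cat3 (p : String) : Bool := geHits p ["Free Throw 3 of 3"] && !geHits p ["Free Throw 1 of 3", "Free Throw 1 of 2", "Free Throw 1 of 1", "Free Throw 2 of 3", "Free Throw 2 of 2"]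
def cat4 (p : String) : Bool := geHits p ["Technical"] && !geHits p ["Free Throw 1 of 3", "Free Throw 1 of 2", "Free Throw 1 of 1", "Free Throw 2 of 3", "Free Throw 2 of 2", "Free Throw 3 of 3"]
def cat5 (p : String) : Bool := geHits p ["Flagrant 1 of 1", "Flagrant 1 of 2"] && !geHits p ["Free Throw 1 of 3", "Free Throw 1 of 2", "Free Throw 1 of 1", "Free Throw 2 of 3", "Free Throw 2 of 2", "Free Throw 3 of 3", "Technical"]
def cat6 (p : String) : Bool := geHits p ["Flagrant 2 of 2"] && !geHits p ["Free Throw 1 of 3", "Free Throw 1 of 2", "Free Throw 1 of 1", "Free Throw 2 of 3", "Free Throw 2 of 2", "Free Throw 3 of 3", "Technical", "Flagrant 1 of 1", "Flagrant 1 of 2"]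
def cat7 (p : String) : Bool := geHits p ["Clear Path"] && !geHits p ["Free Throw 1 of 3", "Free Throw 1 of 2", "Free Throw 1 of 1", "Free Throw 2 of 3", "Free Throw 2 of 2", "Free Throw 3 of 3", "Technical", "Flagrant 1 of 1", "Flagrant 1 of 2", "Flagrant 2 of 2"]

-- what one staged pass computes, named
def msOf (c : String → Bool) (l : List String) : Int :=
  ((l.filter c).countP (fun p => PySem.Str.isIn "MISS" p) : Nat)
def mkOf (c : String → Bool) (l : List String) : Int :=
  ((l.filter c).length : Nat) - msOf c l

-- B's fold over the literal group table, unfolded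
theorem alt_eq (matrix : List String) :
    grossEval_alt matrix =
      [mkOf cat1 matrix, msOf cat1 matrix, mkOf cat2 matrix, msOf cat2 matrix,
       mkOf cat3 matrix, msOf cat3 matrix, mkOf cat4 matrix, msOf cat4 matrix,
       mkOf cat5 matrix, msOf cat5 matrix, mkOf cat6 matrix, msOf cat6 matrix,
       mkOf cat7 matrix, msOf cat7 matrix] := rfl

theorem msOf_eq (c : String → Bool) (l : List String) :
    msOf c l = cnt (fun p => PySem.Str.isIn "MISS" p && c p) l := by
  induction l with
  | nil => rfl
  | cons a t ih =>
    by_cases hc : c a = true <;> by_cases hm : PySem.Str.isIn "MISS" a = true <;>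
      simp_all [msOf, cnt]

theorem mkOf_eq (c : String → Bool) (l : List String) :
    mkOf c l = cnt (fun p => !PySem.Str.isIn "MISS" p && c p) l := by
  induction l with
  | nil => rfl
  | cons a t ih =>
    by_cases hc : c a = true <;> by_cases hm : PySem.Str.isIn "MISS" a = true <;>
      simp_all [mkOf, msOf, cnt]; omega

theorem ite_succ (c : Bool) (a : Int) :
    (if c then a + 1 else a) = a + (if c then 1 else 0) := by cases c <;> simp

theorem cnt_cons (q : String → Bool) (p : String) (l : List String) :
    cnt q (p :: l) = (if q p then 1 else 0) + cnt q l := by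
  simp [cnt, List.countP_cons]; split <;> ring

-- one play's effect on A's state, expressed with B's category predicates
theorem step_char (a1 a2 a3 a4 a5 a6 a7 a8 a9 a10 a11 a12 a13 a14 : Int) (p : String) :
    grossEvalStep (a1, a2, a3, a4, a5, a6, a7, a8, a9, a10, a11, a12, a13, a14) p =
      ((if !PySem.Str.isIn "MISS" p && cat1 p then a1 + 1 else a1),
       (if !PySem.Str.isIn "MISS" p && cat2 p then a2 + 1 else a2),
       (if !PySem.Str.isIn "MISS" p && cat3 p then a3 + 1 else a3),
       (if PySem.Str.isIn "MISS" p && cat1 p then a4 + 1 else a4),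
       (if PySem.Str.isIn "MISS" p && cat2 p then a5 + 1 else a5),
       (if PySem.Str.isIn "MISS" p && cat3 p then a6 + 1 else a6),
       (if PySem.Str.isIn "MISS" p && cat4 p then a7 + 1 else a7),
       (if !PySem.Str.isIn "MISS" p && cat4 p then a8 + 1 else a8),
       (if !PySem.Str.isIn "MISS" p && cat5 p then a9 + 1 else a9),
       (if !PySem.Str.isIn "MISS" p && cat6 p then a10 + 1 else a10),
       (if PySem.Str.isIn "MISS" p && cat5 p then a11 + 1 else a11),
       (if PySem.Str.isIn "MISS" p && cat6 p then a12 + 1 else a12),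
       (if !PySem.Str.isIn "MISS" p && cat7 p then a13 + 1 else a13),
       (if PySem.Str.isIn "MISS" p && cat7 p then a14 + 1 else a14)) := by
  simp only [grossEvalStep, cat1, cat2, cat3, cat4, cat5, cat6, cat7, geHits,
    List.any_cons, List.any_nil, Bool.or_false, Bool.not_false, Bool.and_true]
  generalize PySem.Str.isIn "MISS" p = m
  generalize PySem.Str.isIn "Free Throw 1 of 3" p = b1
  generalize PySem.Str.isIn "Free Throw 1 of 2" p = b2
  generalize PySem.Str.isIn "Free Throw 1 of 1" p = b3
  generalize PySem.Str.isIn "Free Throw 2 of 3" p = b4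
  generalize PySem.Str.isIn "Free Throw 2 of 2" p = b5
  generalize PySem.Str.isIn "Free Throw 3 of 3" p = b6
  generalize PySem.Str.isIn "Technical" p = b7
  generalize PySem.Str.isIn "Flagrant 1 of 1" p = b8
  generalize PySem.Str.isIn "Flagrant 1 of 2" p = b9
  generalize PySem.Str.isIn "Flagrant 2 of 2" p = b10
  generalize PySem.Str.isIn "Clear Path" p = b11
  cases m <;> cases b1 <;> cases b2 <;> cases b3 <;> cases b4 <;> cases b5 <;>
    cases b6 <;> cases b7 <;> cases b8 <;> cases b9 <;> cases b10 <;> cases b11 <;> rfl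

-- A's whole fold: each counter is the count of its category/miss combination
theorem fold_char (matrix : List String)
    (a1 a2 a3 a4 a5 a6 a7 a8 a9 a10 a11 a12 a13 a14 : Int) :
    matrix.foldl grossEvalStep (a1, a2, a3, a4, a5, a6, a7, a8, a9, a10, a11, a12, a13, a14) =
      (a1 + cnt (fun p => !PySem.Str.isIn "MISS" p && cat1 p) matrix,
       a2 + cnt (fun p => !PySem.Str.isIn "MISS" p && cat2 p) matrix,
       a3 + cnt (fun p => !PySem.Str.isIn "MISS" p && cat3 p) matrix,
       a4 + cnt (fun p => PySem.Str.isIn "MISS" p && cat1 p) matrix,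
       a5 + cnt (fun p => PySem.Str.isIn "MISS" p && cat2 p) matrix,
       a6 + cnt (fun p => PySem.Str.isIn "MISS" p && cat3 p) matrix,
       a7 + cnt (fun p => PySem.Str.isIn "MISS" p && cat4 p) matrix,
       a8 + cnt (fun p => !PySem.Str.isIn "MISS" p && cat4 p) matrix,
       a9 + cnt (fun p => !PySem.Str.isIn "MISS" p && cat5 p) matrix,
       a10 + cnt (fun p => !PySem.Str.isIn "MISS" p && cat6 p) matrix,
       a11 + cnt (fun p => PySem.Str.isIn "MISS" p && cat5 p) matrix,
       a12 + cnt (fun p => PySem.Str.isIn "MISS" p && cat6 p) matrix,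
       a13 + cnt (fun p => !PySem.Str.isIn "MISS" p && cat7 p) matrix,
       a14 + cnt (fun p => PySem.Str.isIn "MISS" p && cat7 p) matrix) := by
  induction matrix generalizing a1 a2 a3 a4 a5 a6 a7 a8 a9 a10 a11 a12 a13 a14 with
  | nil => simp [cnt]
  | cons p rest ih =>
    simp only [List.foldl_cons, step_char, ih, cnt_cons, ite_succ, add_assoc]

-- ===== VERDICT (by name: the statement is the Claim_ definition above) =====
theorem grossEval_spec : Claim_equal_grossEval := by
  intro matrix _
  show grossEval matrix = grossEval_alt matrix
  rw [alt_eq, grossEval, fold_char]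
  simp only [zero_add, msOf_eq, mkOf_eq]
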